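-- pv_equiv track=rewrite | github.com/ScorpionResponse/freelancefinder | freelancefinder/deploybot.py | parse_build_message
-- ===== SOURCE A (Python) =====
-- def parse_build_message(build_message):
--     """Get info out of the travis build message."""
--     build_num = 'unknown'
--     build_id = 'unknown'
--     branch = 'unknown'
--     status = 'unknown'
--
--     # TODO(Paul): OMG hax.  This will break probably.
--     words = build_message.split(' ')
--     for word in words:
--         if word.startswith('<') and word.endswith('>'):
--             build_num = word
--         if word.startswith('(') and word.endswith(')'):
--             build_id = word[1:-1]
--         if word.startswith('ScorpionResponse/freelancefinder@'):
--             branch = word.split('@')[1]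
--         if word in ('passed', 'failed'):
--             status = word
--     return branch, status, build_num, build_id
-- ===== SOURCE B (Python) =====
-- def parse_build_message(build_message):
--     """Get info out of the travis build message."""
--     words = build_message.split(' ')
--     rwords = list(reversed(words))
--
--     build_num = next((w for w in rwords
--                       if w.startswith('<') and w.endswith('>')), 'unknown')
--
--     id_word = next((w for w in rwords
--                     if w.startswith('(') and w.endswith(')')), None)
--     build_id = id_word[1:-1] if id_word is not None else 'unknown'
--
--     branch_word = next((w for w in rwords
--                         if w.startswith('ScorpionResponse/freelancefinder@')), None)
--     branch = branch_word.split('@')[1] if branch_word is not None else 'unknown'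
--
--     status = next((w for w in rwords if w in ('passed', 'failed')), 'unknown')
--
--     return branch, status, build_num, build_id
-- ===== Notes on version B (the rewrite author's own statement) =====
-- stated objective: alternative
-- what changed: Replaces A's single forward loop threading four mutable variables with four independent last-match searches (next over the reversed word list), one per field.
import Mathlib
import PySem

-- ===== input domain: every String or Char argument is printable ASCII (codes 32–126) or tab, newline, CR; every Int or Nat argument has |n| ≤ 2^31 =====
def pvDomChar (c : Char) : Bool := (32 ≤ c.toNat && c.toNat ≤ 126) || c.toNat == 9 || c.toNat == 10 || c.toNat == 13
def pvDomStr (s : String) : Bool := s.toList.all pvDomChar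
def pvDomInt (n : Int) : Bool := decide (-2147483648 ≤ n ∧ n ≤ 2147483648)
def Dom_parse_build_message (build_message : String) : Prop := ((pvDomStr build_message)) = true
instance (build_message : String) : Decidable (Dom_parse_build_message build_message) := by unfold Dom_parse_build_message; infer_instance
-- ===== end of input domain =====

-- B replaces A's single forward loop threading four mutable variables by four independent
-- reverse-scan last-match searches over the same word list (objective: alternative decomposition).

-- shared word tests (the same literal tests both Pythons perform)
def isNumWord (w : String) : Bool := PySem.Str.startswith w "<" && PySem.Str.endswith w ">"
def isIdWord (w : String) : Bool := PySem.Str.startswith w "(" && PySem.Str.endswith w ")"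
def isBranchWord (w : String) : Bool := PySem.Str.startswith w "ScorpionResponse/freelancefinder@"
def isStatusWord (w : String) : Bool := w == "passed" || w == "failed"

-- ===== PORT A =====
-- word.split('@')[1] always exists when the startswith guard fired ('@' is in the
-- matched prefix), so the total pyGetD with default "" is exact there; likewise
-- split(' ') with a non-empty separator never raises, so .getD [] is exact.
def parse_build_message (build_message : String) : String × String × String × String :=
  let words := (PySem.Str.split? build_message " ").getD []
  let st := words.foldl (fun acc word =>
    ( if isNumWord word then word else acc.1,
      if isIdWord word then PySem.Str.slice word (some 1) (some (-1)) else acc.2.1,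
      if isBranchWord word then PySem.List.pyGetD ((PySem.Str.split? word "@").getD []) 1 "" else acc.2.2.1,
      if isStatusWord word then word else acc.2.2.2 ))
    ("unknown", "unknown", "unknown", "unknown")
  (st.2.2.1, st.2.2.2, st.1, st.2.1)

-- ===== PORT B =====
def parse_build_message_alt (build_message : String) : String × String × String × String :=
  let words := (PySem.Str.split? build_message " ").getD []
  let rwords := words.reverse
  let build_num := (rwords.find? isNumWord).getD "unknown"
  let build_id :=
    match rwords.find? isIdWord with
    | some w => PySem.Str.slice w (some 1) (some (-1))
    | none => "unknown"
  let branch :=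
    match rwords.find? isBranchWord with
    | some w => PySem.List.pyGetD ((PySem.Str.split? w "@").getD []) 1 ""
    | none => "unknown"
  let status := (rwords.find? isStatusWord).getD "unknown"
  (branch, status, build_num, build_id)

-- ===== PRECONDITION & SPEC =====
def Spec_parse_build_message (build_message : String) (out : String × String × String × String) : Prop := out = parse_build_message_alt build_message
instance (build_message : String) (out : String × String × String × String) : Decidable (Spec_parse_build_message build_message out) := by unfold Spec_parse_build_message; infer_instance

-- ===== CLAIM (what is proved, stated in full; the proofs are below) =====
def Claim_equal_parse_build_message : Prop := ∀ (build_message : String), Dom_parse_build_message build_message → Spec_parse_build_message build_message (parse_build_message build_message)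

-- ===== LEMMAS AND PROOFS =====

-- A last-match accumulator loop equals find? on the reversed list.
theorem foldl_if_eq_find? {α β : Type} (p : α → Bool) (f : α → β) (ws : List α) (init : β) :
    ws.foldl (fun acc w => if p w then f w else acc) init
      = (ws.reverse.find? p).elim init f := by
  induction ws generalizing init with
  | nil => rfl
  | cons w t ih =>
      simp only [List.foldl_cons, List.reverse_cons, List.find?_append, ih]
      cases h : t.reverse.find? p with
      | some x => simp
      | none =>
          by_cases hp : p w = true <;> simp [hp, List.find?]

-- A fold over a 4-tuple of independent field updates is four independent folds.
theorem foldl_prod4 {α β₁ β₂ β₃ β₄ : Type}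
    (g₁ : β₁ → α → β₁) (g₂ : β₂ → α → β₂) (g₃ : β₃ → α → β₃) (g₄ : β₄ → α → β₄)
    (ws : List α) (a : β₁) (b : β₂) (c : β₃) (d : β₄) :
    ws.foldl (fun acc w => (g₁ acc.1 w, g₂ acc.2.1 w, g₃ acc.2.2.1 w, g₄ acc.2.2.2 w)) (a, b, c, d)
      = (ws.foldl g₁ a, ws.foldl g₂ b, ws.foldl g₃ c, ws.foldl g₄ d) := by
  induction ws generalizing a b c d with
  | nil => rfl
  | cons w t ih => simp only [List.foldl_cons]; exact ih _ _ _ _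

-- ===== VERDICT (by name: the statement is the Claim_ definition above) =====
theorem parse_build_message_spec : Claim_equal_parse_build_message := by
  unfold Claim_equal_parse_build_message
  intro bm _
  unfold Spec_parse_build_message parse_build_message parse_build_message_alt
  dsimp only
  rw [foldl_prod4
        (fun s w => if isNumWord w then w else s)
        (fun s w => if isIdWord w then PySem.Str.slice w (some 1) (some (-1)) else s)
        (fun s w => if isBranchWord w then PySem.List.pyGetD ((PySem.Str.split? w "@").getD []) 1 "" else s)
        (fun s w => if isStatusWord w then w else s),
      foldl_if_eq_find? isNumWord (fun w => w),
      foldl_if_eq_find? isIdWord (fun w => PySem.Str.slice w (some 1) (some (-1))),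
      foldl_if_eq_find? isBranchWord (fun w => PySem.List.pyGetD ((PySem.Str.split? w "@").getD []) 1 ""),
      foldl_if_eq_find? isStatusWord (fun w => w)]
  cases ((PySem.Str.split? bm " ").getD []).reverse.find? isNumWord <;>
  cases ((PySem.Str.split? bm " ").getD []).reverse.find? isIdWord <;>
  cases ((PySem.Str.split? bm " ").getD []).reverse.find? isBranchWord <;>
  cases ((PySem.Str.split? bm " ").getD []).reverse.find? isStatusWord <;> rfl
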